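-- pv_equiv track=rewrite | github.com/Xelerezex/learning-space | stepik-courses/stepik-practice-python-math/3-facultative/4.7-enigma/step-5/main.py | enigma
-- ===== SOURCE A (Python) =====
-- def enigma(text, ref, rot1, rot2, rot3):
--     alphabet = 'ABCDEFGHIJKLMNOPQRSTUVWXYZ'
--     text = text.upper()
--     text_list = [x for x in text if x in alphabet]
--     text_len = len(text_list)
--     for i in range(0, text_len):
--         forward = rotor(rotor(rotor(text_list[i], rot3, False), rot2, False), rot1, False)
--         reflected = reflector(forward, ref)
--         backward = rotor(rotor(rotor(reflected, rot1, True), rot2, True), rot3, True)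
--         text_list[i] = backward
--     return ''.join(text_list)
--
-- def reflector(symbol, n):
--     REFLECTORS = {0: 'ABCDEFGHIJKLMNOPQRSTUVWXYZ',
--                   1: 'YRUHQSLDPXNGOKMIEBFZCWVJAT',
--                   2: 'FVPJIAOYEDRZXWGCTKUQSBNMHL',
--                   3: 'ENKQAUYWJICOPBLMDXZVFTHRGS',
--                   4: 'RDOBJNTKVEHMLFCWZAXGYIPSUQ'}
--     symbol_index = REFLECTORS[0].index(symbol)
--     return REFLECTORS[n][symbol_index]
--
-- def rotor(symbol, n, reverse=False):
--     ROTORS = {0: 'ABCDEFGHIJKLMNOPQRSTUVWXYZ',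
--               1: 'EKMFLGDQVZNTOWYHXUSPAIBRCJ',
--               2: 'AJDKSIRUXBLHWTMCQGZNPYFVOE',
--               3: 'BDFHJLCPRTXVZNYEIWGAKMUSQO',
--               4: 'ESOVPZJAYQUIRHXLNFTGKDCMWB',
--               5: 'VZBRGITYUPSDNHLXAWMJQOFECK',
--               6: 'JPGVOUMFYQBENHZRDKASXLICTW',
--               7: 'NZJHGRCXMYSWBOUFAIVLPEKQDT',
--               8: 'FKQHTLXOCBJSPDZRAMEWNIUYGV',
--               'beta': 'LEYJVCNIXWPBQMDRTAKZGFUHOS',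
--               'gamma': 'FSOKANUERHMBTIYCWLQPZXVGJD'}
--     if not reverse:
--         symbol_index = ROTORS[0].index(symbol)
--         return ROTORS[n][symbol_index]
--     else:
--         symbol_index = ROTORS[n].index(symbol)
--         return ROTORS[0][symbol_index]
-- ===== SOURCE B (Python) =====
-- def enigma(text, ref, rot1, rot2, rot3):
--     ALPHA = 'ABCDEFGHIJKLMNOPQRSTUVWXYZ'
--     ROTORS = {0: 'ABCDEFGHIJKLMNOPQRSTUVWXYZ',
--               1: 'EKMFLGDQVZNTOWYHXUSPAIBRCJ',
--               2: 'AJDKSIRUXBLHWTMCQGZNPYFVOE',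
--               3: 'BDFHJLCPRTXVZNYEIWGAKMUSQO',
--               4: 'ESOVPZJAYQUIRHXLNFTGKDCMWB',
--               5: 'VZBRGITYUPSDNHLXAWMJQOFECK',
--               6: 'JPGVOUMFYQBENHZRDKASXLICTW',
--               7: 'NZJHGRCXMYSWBOUFAIVLPEKQDT',
--               8: 'FKQHTLXOCBJSPDZRAMEWNIUYGV'}
--     REFLECTORS = {0: 'ABCDEFGHIJKLMNOPQRSTUVWXYZ',
--                   1: 'YRUHQSLDPXNGOKMIEBFZCWVJAT',
--                   2: 'FVPJIAOYEDRZXWGCTKUQSBNMHL',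
--                   3: 'ENKQAUYWJICOPBLMDXZVFTHRGS',
--                   4: 'RDOBJNTKVEHMLFCWZAXGYIPSUQ'}
--     letters = [c for c in text.upper() if 'A' <= c <= 'Z']
--     if not letters:
--         return ''
--     r1, r2, r3, rf = ROTORS[rot1], ROTORS[rot2], ROTORS[rot3], REFLECTORS[ref]
--     # compose the whole seven-stage substitution once into a single 26-entry table
--     table = []
--     for i in range(26):
--         x = r1[ord(r2[ord(r3[i]) - 65]) - 65]
--         x = rf[ord(x) - 65]
--         x = ALPHA[r1.index(x)]
--         x = ALPHA[r2.index(x)]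
--         x = ALPHA[r3.index(x)]
--         table.append(x)
--     return ''.join(table[ord(c) - 65] for c in letters)
-- ===== Notes on version B (the rewrite author's own statement) =====
-- stated objective: faster
-- what changed: Instead of pushing every character through seven rotor/reflector dictionary-and-.index lookups, B composes the whole rotor chain once into a single 26-entry substitution table and then encrypts the filtered text in one table-lookup pass.
import Mathlib
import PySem

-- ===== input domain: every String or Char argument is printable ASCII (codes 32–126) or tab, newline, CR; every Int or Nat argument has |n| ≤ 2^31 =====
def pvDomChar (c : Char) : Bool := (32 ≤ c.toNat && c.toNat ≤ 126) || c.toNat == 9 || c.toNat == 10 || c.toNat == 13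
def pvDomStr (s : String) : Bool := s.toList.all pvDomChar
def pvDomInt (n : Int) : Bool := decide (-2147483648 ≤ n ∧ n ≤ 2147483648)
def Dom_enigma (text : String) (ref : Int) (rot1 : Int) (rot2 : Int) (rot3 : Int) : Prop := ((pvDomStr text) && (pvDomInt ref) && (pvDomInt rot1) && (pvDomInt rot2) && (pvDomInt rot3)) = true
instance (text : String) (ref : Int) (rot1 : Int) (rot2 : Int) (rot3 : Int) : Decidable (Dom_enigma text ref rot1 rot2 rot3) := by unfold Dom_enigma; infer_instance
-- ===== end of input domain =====

-- B replaces A's seven dictionary/.index lookups per character by one precomputed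
-- 26-entry substitution table applied in a single pass (fewer lookups per character).


-- ===== PORT A =====
-- Python's ROTORS also carries the string keys 'beta'/'gamma'; here n is always an int,
-- and an int never equals a str key in Python, so those two entries are unreachable and omitted.
def aRotors : PySem.Dict Int String := PySem.Dict.ofList
  [(0, "ABCDEFGHIJKLMNOPQRSTUVWXYZ"),
   (1, "EKMFLGDQVZNTOWYHXUSPAIBRCJ"),
   (2, "AJDKSIRUXBLHWTMCQGZNPYFVOE"),
   (3, "BDFHJLCPRTXVZNYEIWGAKMUSQO"),
   (4, "ESOVPZJAYQUIRHXLNFTGKDCMWB"),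
   (5, "VZBRGITYUPSDNHLXAWMJQOFECK"),
   (6, "JPGVOUMFYQBENHZRDKASXLICTW"),
   (7, "NZJHGRCXMYSWBOUFAIVLPEKQDT"),
   (8, "FKQHTLXOCBJSPDZRAMEWNIUYGV")]

def aReflectors : PySem.Dict Int String := PySem.Dict.ofList
  [(0, "ABCDEFGHIJKLMNOPQRSTUVWXYZ"),
   (1, "YRUHQSLDPXNGOKMIEBFZCWVJAT"),
   (2, "FVPJIAOYEDRZXWGCTKUQSBNMHL"),
   (3, "ENKQAUYWJICOPBLMDXZVFTHRGS"),
   (4, "RDOBJNTKVEHMLFCWZAXGYIPSUQ")]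

-- rotor(symbol, n, reverse); none = the Python call raises (KeyError on ROTORS[n], ValueError on .index)
def rotorA (symbol : Char) (n : Int) (reverse : Bool) : Option Char :=
  if reverse = false then do
    let s0 ← aRotors.get? 0
    let i ← PySem.List.index? s0.toList symbol
    let sn ← aRotors.get? n
    sn.toList[i]?
  else do
    let sn ← aRotors.get? n
    let i ← PySem.List.index? sn.toList symbol
    let s0 ← aRotors.get? 0
    s0.toList[i]?

-- reflector(symbol, n); none = the Python call raises
def reflectorA (symbol : Char) (n : Int) : Option Char := do
  let s0 ← aReflectors.get? 0
  let i ← PySem.List.index? s0.toList symbol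
  let sn ← aReflectors.get? n
  sn.toList[i]?

-- the body of A's for-loop for one character
def enigmaStep (ref rot1 rot2 rot3 : Int) (c : Char) : Option Char := do
  let f1 ← rotorA c rot3 false
  let f2 ← rotorA f1 rot2 false
  let forward ← rotorA f2 rot1 false
  let reflected ← reflectorA forward ref
  let b1 ← rotorA reflected rot1 true
  let b2 ← rotorA b1 rot2 true
  rotorA b2 rot3 true

def enigma (text : String) (ref : Int) (rot1 : Int) (rot2 : Int) (rot3 : Int) : String :=
  let alphabet := "ABCDEFGHIJKLMNOPQRSTUVWXYZ"
  let textList := (PySem.Str.upper text).toList.filter (fun x => alphabet.toList.contains x)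
  match textList.mapM (enigmaStep ref rot1 rot2 rot3) with
  | some l => String.ofList l
  | none => ""   -- some loop iteration raised in Python; excluded by Pre_enigma

-- ===== PORT B =====
def bAlpha : List Char := "ABCDEFGHIJKLMNOPQRSTUVWXYZ".toList

def bRotors : PySem.Dict Int String := PySem.Dict.ofList
  [(0, "ABCDEFGHIJKLMNOPQRSTUVWXYZ"),
   (1, "EKMFLGDQVZNTOWYHXUSPAIBRCJ"),
   (2, "AJDKSIRUXBLHWTMCQGZNPYFVOE"),
   (3, "BDFHJLCPRTXVZNYEIWGAKMUSQO"),
   (4, "ESOVPZJAYQUIRHXLNFTGKDCMWB"),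
   (5, "VZBRGITYUPSDNHLXAWMJQOFECK"),
   (6, "JPGVOUMFYQBENHZRDKASXLICTW"),
   (7, "NZJHGRCXMYSWBOUFAIVLPEKQDT"),
   (8, "FKQHTLXOCBJSPDZRAMEWNIUYGV")]

def bReflectors : PySem.Dict Int String := PySem.Dict.ofList
  [(0, "ABCDEFGHIJKLMNOPQRSTUVWXYZ"),
   (1, "YRUHQSLDPXNGOKMIEBFZCWVJAT"),
   (2, "FVPJIAOYEDRZXWGCTKUQSBNMHL"),
   (3, "ENKQAUYWJICOPBLMDXZVFTHRGS"),
   (4, "RDOBJNTKVEHMLFCWZAXGYIPSUQ")]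

-- one entry of Source B's composed table (index i of the alphabet); on the Pre_-admitted path every
-- indexing / .index below is in range, so the getD defaults are never consulted
def bStep (r1 r2 r3 rf : List Char) (i : Nat) : Char :=
  let x1 := r1.getD ((r2.getD ((r3.getD i 'A').toNat - 65) 'A').toNat - 65) 'A'
  let x2 := rf.getD (x1.toNat - 65) 'A'
  let x3 := bAlpha.getD ((PySem.List.index? r1 x2).getD 0) 'A'
  let x4 := bAlpha.getD ((PySem.List.index? r2 x3).getD 0) 'A'
  bAlpha.getD ((PySem.List.index? r3 x4).getD 0) 'A'

def enigma_alt (text : String) (ref : Int) (rot1 : Int) (rot2 : Int) (rot3 : Int) : String :=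
  let letters := (PySem.Str.upper text).toList.filter (fun c => decide ('A' ≤ c ∧ c ≤ 'Z'))
  if letters.isEmpty then "" else
    -- dict lookups; "" default unreachable under Pre_enigma (Python raises KeyError there)
    let r1 := (bRotors.getD rot1 "").toList
    let r2 := (bRotors.getD rot2 "").toList
    let r3 := (bRotors.getD rot3 "").toList
    let rf := (bReflectors.getD ref "").toList
    let table := (List.range 26).map (bStep r1 r2 r3 rf)
    String.ofList (letters.map (fun c => table.getD (c.toNat - 65) 'A'))

-- ===== PRECONDITION & SPEC =====
-- Pre_ excludes exactly the inputs on which Python A raises KeyError: at least one letter survives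
-- the filter AND some rotor/reflector argument is outside its dict's int keys (ROTORS 0–8, REFLECTORS 0–4).
def Pre_enigma (text : String) (ref : Int) (rot1 : Int) (rot2 : Int) (rot3 : Int) : Prop :=
  ((PySem.Str.upper text).toList.all (fun c => !(decide ('A' ≤ c ∧ c ≤ 'Z')))) = true
  ∨ (0 ≤ ref ∧ ref ≤ 4 ∧ 0 ≤ rot1 ∧ rot1 ≤ 8 ∧ 0 ≤ rot2 ∧ rot2 ≤ 8 ∧ 0 ≤ rot3 ∧ rot3 ≤ 8)
instance (text : String) (ref : Int) (rot1 : Int) (rot2 : Int) (rot3 : Int) : Decidable (Pre_enigma text ref rot1 rot2 rot3) := by unfold Pre_enigma; infer_instance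

def pvWitness_enigma : String × Int × Int × Int × Int := ("Hello, World!", 1, 2, 3, 4)

def Spec_enigma (text : String) (ref : Int) (rot1 : Int) (rot2 : Int) (rot3 : Int) (out : String) : Prop := out = enigma_alt text ref rot1 rot2 rot3
instance (text : String) (ref : Int) (rot1 : Int) (rot2 : Int) (rot3 : Int) (out : String) : Decidable (Spec_enigma text ref rot1 rot2 rot3 out) := by unfold Spec_enigma; infer_instance

-- ===== CLAIM (what is proved, stated in full; the proofs are below) =====
def Claim_equal_enigma : Prop := ∀ (text : String) (ref : Int) (rot1 : Int) (rot2 : Int) (rot3 : Int), Dom_enigma text ref rot1 rot2 rot3 → Pre_enigma text ref rot1 rot2 rot3 → Spec_enigma text ref rot1 rot2 rot3 (enigma text ref rot1 rot2 rot3)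

-- ===== LEMMAS AND PROOFS =====
set_option maxRecDepth 4096

-- a 26-char string of uppercase letters containing every uppercase letter (all tables here qualify)
def LP (s : List Char) : Prop :=
  s.length = 26 ∧ (∀ i, i < 26 → 65 ≤ (s.getD i 'A').toNat ∧ (s.getD i 'A').toNat ≤ 90)
    ∧ (∀ i, i < 26 → Char.ofNat (65 + i) ∈ s)

theorem letter_iff (c : Char) : ('A' ≤ c ∧ c ≤ 'Z') ↔ (65 ≤ c.toNat ∧ c.toNat ≤ 90) := by
  rw [Char.le_def, Char.le_def, UInt32.le_iff_toNat_le, UInt32.le_iff_toNat_le]; rfl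

theorem LP_alpha : LP bAlpha := by
  unfold LP; exact ⟨by decide, by decide, by decide⟩

theorem mem_of_letter {s : List Char} (hs : LP s) {c : Char}
    (h1 : 65 ≤ c.toNat) (h2 : c.toNat ≤ 90) : c ∈ s := by
  have := hs.2.2 (c.toNat - 65) (by omega)
  rwa [show 65 + (c.toNat - 65) = c.toNat by omega, Char.ofNat_toNat] at this

theorem alpha_index {c : Char} (h1 : 65 ≤ c.toNat) (h2 : c.toNat ≤ 90) :
    PySem.List.index? bAlpha c = some (c.toNat - 65) := by
  have key : ∀ i, i < 26 → PySem.List.index? bAlpha (Char.ofNat (65 + i)) = some i := by decide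
  have := key (c.toNat - 65) (by omega)
  rwa [show 65 + (c.toNat - 65) = c.toNat by omega, Char.ofNat_toNat] at this

theorem getD_letter {s : List Char} (hs : LP s) {i : Nat} (h : i < 26) :
    65 ≤ (s.getD i 'A').toNat ∧ (s.getD i 'A').toNat ≤ 90 :=
  hs.2.1 i h

theorem mem_letter {s : List Char} (hs : LP s) {c : Char} (hc : c ∈ s) :
    65 ≤ c.toNat ∧ c.toNat ≤ 90 := by
  obtain ⟨i, hi, hgl⟩ := List.mem_iff_getElem.mp hc
  have hi26 : i < 26 := by have := hs.1; omega
  have : s.getD i 'A' = c := by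
    rw [List.getD_eq_getElem?_getD, List.getElem?_eq_getElem hi]; exact hgl
  rw [← this]; exact hs.2.1 i hi26

theorem getElem?_eq_getD {s : List Char} {i : Nat} (h : i < s.length) :
    s[i]? = some (s.getD i 'A') := by
  rw [List.getElem?_eq_getElem h, List.getD_eq_getElem?_getD, List.getElem?_eq_getElem h]; rfl

theorem rotors_ok (n : Int) (h0 : 0 ≤ n) (h8 : n ≤ 8) :
    ∃ s : List Char, (aRotors.get? n).map String.toList = some s
      ∧ (bRotors.getD n "").toList = s ∧ LP s := by
  interval_cases n <;>
    exact ⟨_, rfl, rfl, by unfold LP; exact ⟨by decide, by decide, by decide⟩⟩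

theorem reflectors_ok (n : Int) (h0 : 0 ≤ n) (h4 : n ≤ 4) :
    ∃ s : List Char, (aReflectors.get? n).map String.toList = some s
      ∧ (bReflectors.getD n "").toList = s ∧ LP s := by
  interval_cases n <;>
    exact ⟨_, rfl, rfl, by unfold LP; exact ⟨by decide, by decide, by decide⟩⟩

theorem rotorA_fwd {c : Char} {n : Int} {s : List Char}
    (hn : (aRotors.get? n).map String.toList = some s) (hs : LP s)
    (h1 : 65 ≤ c.toNat) (h2 : c.toNat ≤ 90) :
    rotorA c n false = some (s.getD (c.toNat - 65) 'A') := by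
  obtain ⟨t, ht, hts⟩ : ∃ t, aRotors.get? n = some t ∧ t.toList = s := by
    cases h : aRotors.get? n with
    | none => rw [h] at hn; simp at hn
    | some t => rw [h] at hn; exact ⟨t, rfl, by simpa using hn⟩
  have hlen : c.toNat - 65 < s.length := by have := hs.1; omega
  unfold rotorA
  rw [if_pos rfl]
  show ((aRotors.get? 0).bind fun s0 => (PySem.List.index? s0.toList c).bind fun i =>
    (aRotors.get? n).bind fun sn => sn.toList[i]?) = _
  rw [show aRotors.get? 0 = some "ABCDEFGHIJKLMNOPQRSTUVWXYZ" from rfl, Option.bind_some]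
  rw [show ("ABCDEFGHIJKLMNOPQRSTUVWXYZ" : String).toList = bAlpha from rfl, alpha_index h1 h2,
    Option.bind_some, ht, Option.bind_some, hts]
  exact getElem?_eq_getD hlen

theorem rotorA_rev {c : Char} {n : Int} {s : List Char}
    (hn : (aRotors.get? n).map String.toList = some s) (hs : LP s)
    (h1 : 65 ≤ c.toNat) (h2 : c.toNat ≤ 90) :
    ∃ j, PySem.List.index? s c = some j ∧ j < 26
      ∧ rotorA c n true = some (bAlpha.getD j 'A') := by
  obtain ⟨t, ht, hts⟩ : ∃ t, aRotors.get? n = some t ∧ t.toList = s := by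
    cases h : aRotors.get? n with
    | none => rw [h] at hn; simp at hn
    | some t => rw [h] at hn; exact ⟨t, rfl, by simpa using hn⟩
  have hc : c ∈ s := mem_of_letter hs h1 h2
  have hsome : (PySem.List.index? s c).isSome := (PySem.List.index?_isSome_iff s c).mpr hc
  obtain ⟨j, hj⟩ := Option.isSome_iff_exists.mp hsome
  obtain ⟨hk, -, -⟩ := PySem.List.getElem_of_index?_eq_some hj
  have hj26 : j < 26 := by have := hs.1; omega
  refine ⟨j, hj, hj26, ?_⟩
  unfold rotorA
  rw [if_neg (by simp)]
  show ((aRotors.get? n).bind fun sn => (PySem.List.index? sn.toList c).bind fun i =>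
    (aRotors.get? 0).bind fun s0 => s0.toList[i]?) = _
  rw [ht, Option.bind_some, hts, hj, Option.bind_some,
    show aRotors.get? 0 = some "ABCDEFGHIJKLMNOPQRSTUVWXYZ" from rfl, Option.bind_some,
    show ("ABCDEFGHIJKLMNOPQRSTUVWXYZ" : String).toList = bAlpha from rfl]
  have hblen : bAlpha.length = 26 := by decide
  exact getElem?_eq_getD (by omega)

theorem reflectorA_eq {c : Char} {n : Int} {s : List Char}
    (hn : (aReflectors.get? n).map String.toList = some s) (hs : LP s)
    (h1 : 65 ≤ c.toNat) (h2 : c.toNat ≤ 90) :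
    reflectorA c n = some (s.getD (c.toNat - 65) 'A') := by
  obtain ⟨t, ht, hts⟩ : ∃ t, aReflectors.get? n = some t ∧ t.toList = s := by
    cases h : aReflectors.get? n with
    | none => rw [h] at hn; simp at hn
    | some t => rw [h] at hn; exact ⟨t, rfl, by simpa using hn⟩
  have hlen : c.toNat - 65 < s.length := by have := hs.1; omega
  unfold reflectorA
  show ((aReflectors.get? 0).bind fun s0 => (PySem.List.index? s0.toList c).bind fun i =>
    (aReflectors.get? n).bind fun sn => sn.toList[i]?) = _
  rw [show aReflectors.get? 0 = some "ABCDEFGHIJKLMNOPQRSTUVWXYZ" from rfl, Option.bind_some]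
  rw [show ("ABCDEFGHIJKLMNOPQRSTUVWXYZ" : String).toList = bAlpha from rfl, alpha_index h1 h2,
    Option.bind_some, ht, Option.bind_some, hts]
  exact getElem?_eq_getD hlen

theorem step_eq {ref rot1 rot2 rot3 : Int} {s1 s2 s3 sr : List Char}
    (ha1 : (aRotors.get? rot1).map String.toList = some s1) (h1 : LP s1)
    (ha2 : (aRotors.get? rot2).map String.toList = some s2) (h2 : LP s2)
    (ha3 : (aRotors.get? rot3).map String.toList = some s3) (h3 : LP s3)
    (har : (aReflectors.get? ref).map String.toList = some sr) (hr : LP sr)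
    {c : Char} (hc1 : 65 ≤ c.toNat) (hc2 : c.toNat ≤ 90) :
    enigmaStep ref rot1 rot2 rot3 c = some (bStep s1 s2 s3 sr (c.toNat - 65)) := by
  have hx1 := getD_letter h3 (show c.toNat - 65 < 26 by omega)
  have hx2 := getD_letter h2 (show (s3.getD (c.toNat - 65) 'A').toNat - 65 < 26 by omega)
  have hx3 := getD_letter h1 (show (s2.getD ((s3.getD (c.toNat - 65) 'A').toNat - 65) 'A').toNat - 65 < 26 by omega)
  have hx4 := getD_letter hr (show (s1.getD ((s2.getD ((s3.getD (c.toNat - 65) 'A').toNat - 65) 'A').toNat - 65) 'A').toNat - 65 < 26 by omega)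
  have f1 := rotorA_fwd ha3 h3 hc1 hc2
  have f2 := rotorA_fwd ha2 h2 hx1.1 hx1.2
  have f3 := rotorA_fwd ha1 h1 hx2.1 hx2.2
  have fr := reflectorA_eq har hr hx3.1 hx3.2
  obtain ⟨j1, hj1, hj1lt, hb1⟩ := rotorA_rev (c := (sr.getD ((s1.getD ((s2.getD ((s3.getD (c.toNat - 65) 'A').toNat - 65) 'A').toNat - 65) 'A').toNat - 65) 'A')) ha1 h1 hx4.1 hx4.2
  have hx5 := getD_letter LP_alpha hj1lt
  obtain ⟨j2, hj2, hj2lt, hb2⟩ := rotorA_rev (c := bAlpha.getD j1 'A') ha2 h2 hx5.1 hx5.2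
  have hx6 := getD_letter LP_alpha hj2lt
  obtain ⟨j3, hj3, hj3lt, hb3⟩ := rotorA_rev (c := bAlpha.getD j2 'A') ha3 h3 hx6.1 hx6.2
  unfold enigmaStep
  show ((rotorA c rot3 false).bind fun f1 => (rotorA f1 rot2 false).bind fun f2 =>
    (rotorA f2 rot1 false).bind fun fw => (reflectorA fw ref).bind fun rf =>
    (rotorA rf rot1 true).bind fun b1 => (rotorA b1 rot2 true).bind fun b2 =>
    rotorA b2 rot3 true) = _
  rw [f1, Option.bind_some, f2, Option.bind_some, f3, Option.bind_some, fr, Option.bind_some,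
    hb1, Option.bind_some, hb2, Option.bind_some, hb3]
  simp only [bStep]
  rw [hj1, Option.getD_some, hj2, Option.getD_some, hj3, Option.getD_some]

theorem mapM_eq_map {α β : Type} (f : α → Option β) (g : α → β) (l : List α)
    (h : ∀ a ∈ l, f a = some (g a)) : l.mapM f = some (l.map g) := by
  induction l with
  | nil => rfl
  | cons a t ih =>
    simp [List.mapM_cons, h a (by simp), ih (fun x hx => h x (List.mem_cons_of_mem _ hx))]

theorem filter_bridge (xs : List Char) :
    xs.filter (fun x => ("ABCDEFGHIJKLMNOPQRSTUVWXYZ" : String).toList.contains x)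
      = xs.filter (fun c => decide ('A' ≤ c ∧ c ≤ 'Z')) := by
  apply List.filter_congr
  intro c _
  rw [show ("ABCDEFGHIJKLMNOPQRSTUVWXYZ" : String).toList = bAlpha from rfl]
  by_cases h : 65 ≤ c.toNat ∧ c.toNat ≤ 90
  · have hm : c ∈ bAlpha := mem_of_letter LP_alpha h.1 h.2
    simp [hm, letter_iff, h]
  · have hm : c ∉ bAlpha := fun hc => h (mem_letter LP_alpha hc)
    simp [hm, letter_iff, h]

theorem table_getD {s1 s2 s3 sr : List Char} {i : Nat} (h : i < 26) :
    ((List.range 26).map (bStep s1 s2 s3 sr)).getD i 'A' = bStep s1 s2 s3 sr i := by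
  rw [List.getD_eq_getElem?_getD, List.getElem?_map, List.getElem?_range h]
  rfl

-- ===== VERDICT (by name: the statement is the Claim_ definition above) =====
theorem enigma_spec : Claim_equal_enigma := by
  intro text ref rot1 rot2 rot3 _ hpre
  simp only [Spec_enigma, enigma, enigma_alt]
  rw [filter_bridge]
  set L := (PySem.Str.upper text).toList.filter (fun c => decide ('A' ≤ c ∧ c ≤ 'Z')) with hL
  by_cases hE : L.isEmpty
  · rw [List.isEmpty_iff.mp hE, if_pos (by simp)]
    rfl
  · rcases hpre with hno | ⟨hr0, hr4, h10, h18, h20, h28, h30, h38⟩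
    · exfalso
      apply hE
      rw [hL, List.isEmpty_iff, List.filter_eq_nil_iff]
      intro c hc
      have := List.all_eq_true.mp hno c hc
      simp at this ⊢
      rcases this with h | h
      · intro hA; exact absurd hA (not_le.mpr h)
      · intro _; exact h
    · obtain ⟨s1, ha1, hbl1, h1⟩ := rotors_ok rot1 h10 h18
      obtain ⟨s2, ha2, hbl2, h2⟩ := rotors_ok rot2 h20 h28
      obtain ⟨s3, ha3, hbl3, h3⟩ := rotors_ok rot3 h30 h38
      obtain ⟨sr, har, hblr, hr⟩ := reflectors_ok ref hr0 hr4
      rw [if_neg hE, hbl1, hbl2, hbl3, hblr]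
      rw [mapM_eq_map _ (fun c =>
          ((List.range 26).map (bStep s1 s2 s3 sr)).getD (c.toNat - 65) 'A') L ?_]
      · intro c hc
        have hcl : 65 ≤ c.toNat ∧ c.toNat ≤ 90 := by
          have := (List.mem_filter.mp (hL ▸ hc)).2
          exact (letter_iff c).mp (by simpa using this)
        rw [step_eq ha1 h1 ha2 h2 ha3 h3 har hr hcl.1 hcl.2]
        simp only [table_getD (show c.toNat - 65 < 26 by omega)]
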